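-- pv_equiv track=rewrite | github.com/GagoilKim/Programmers_Algorithm | ParingRemove.py | solution
-- ===== SOURCE A (Python) =====
-- def solution(s):
--     answer = 0
--     result = []
--     for i in (s):
--         if len(result) == 0:
--             result.append(i)
--         elif result[-1] == i:
--             result.pop(-1)
--         else:
--             result.append(i)
--     if len(result) == 0:
--         return 1
--     else:
--         return 0
-- ===== SOURCE B (Python) =====
-- def _pass(t):
--     # remove all leftmost non-overlapping adjacent equal pairs in one scan
--     out = []
--     i = 0
--     n = len(t)
--     while i < n:
--         if i + 1 < n and t[i] == t[i + 1]:
--             i += 2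
--         else:
--             out.append(t[i])
--             i += 1
--     return ''.join(out)
--
--
-- def solution(s):
--     t = s
--     while True:
--         u = _pass(t)
--         if u == t:
--             return 1 if t == '' else 0
--         t = u
-- ===== Notes on version B (the rewrite author's own statement) =====
-- stated objective: alternative
-- what changed: Replaces A's single stack pass (push/pop on last element) with a fixpoint loop that repeatedly deletes all leftmost non-overlapping adjacent equal pairs from the string itself until it no longer changes; correctness rests on confluence of adjacent-pair deletion.
import Mathlib
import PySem

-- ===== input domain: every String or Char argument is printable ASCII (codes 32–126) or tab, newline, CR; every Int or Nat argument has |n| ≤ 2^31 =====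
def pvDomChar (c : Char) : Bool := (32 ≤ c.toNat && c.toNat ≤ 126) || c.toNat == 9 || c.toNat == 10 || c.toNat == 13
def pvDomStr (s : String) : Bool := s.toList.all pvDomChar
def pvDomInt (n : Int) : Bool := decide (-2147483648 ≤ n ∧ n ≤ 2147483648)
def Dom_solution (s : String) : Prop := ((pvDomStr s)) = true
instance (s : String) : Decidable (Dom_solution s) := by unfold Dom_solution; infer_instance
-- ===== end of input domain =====

-- B replaces A's one-pass stack with a fixpoint loop removing all leftmost adjacent equal pairs per scan (alternative decomposition, not faster).

-- ===== PORT A =====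
-- one loop step of A: append if stack empty, pop if top equals i, else append
def stepA (res : List Char) (c : Char) : List Char :=
  if res.length = 0 then res ++ [c]
  else if res.getLast? = some c then res.dropLast
  else res ++ [c]

def solution (s : String) : Int :=
  if (s.toList.foldl stepA []).length = 0 then 1 else 0

-- ===== PORT B =====
-- _pass: one scan removing leftmost non-overlapping adjacent equal pairs
def passB : List Char → List Char
  | a :: b :: t => if a = b then passB t else a :: passB (b :: t)
  | [a] => [a]
  | [] => []

theorem passB_len_le (t : List Char) : (passB t).length ≤ t.length := by
  fun_induction passB t <;> simp_all <;> omega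

theorem passB_shrink (t : List Char) :
    passB t = t ∨ (passB t).length + 2 ≤ t.length := by
  fun_induction passB t with
  | case1 b t ih =>
    right; have := passB_len_le t; simp; omega
  | case2 a b t hab ih =>
    rcases ih with h | h
    · left; simp [passB, hab, h]
    · right; simp only [passB, hab, if_neg, List.length_cons] at h ⊢; simp [hab]; omega
  | _ => left; rfl

theorem passB_len_lt (t : List Char) (h : passB t ≠ t) : (passB t).length < t.length := by
  rcases passB_shrink t with h' | h'
  · exact absurd h' h
  · omega

-- the fixpoint loop of B
def fixB (t : List Char) : List Char :=
  let u := passB t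
  if h : u = t then t else fixB u
termination_by t.length
decreasing_by exact passB_len_lt t h

def solution_alt (s : String) : Int :=
  if fixB s.toList = [] then 1 else 0

-- ===== PRECONDITION & SPEC =====
def Spec_solution (s : String) (out : Int) : Prop := out = solution_alt s
instance (s : String) (out : Int) : Decidable (Spec_solution s out) := by unfold Spec_solution; infer_instance

-- ===== CLAIM (what is proved, stated in full; the proofs are below) =====
def Claim_equal_solution : Prop := ∀ (s : String), Dom_solution s → Spec_solution s (solution s)

-- ===== LEMMAS AND PROOFS =====

-- A's stack never holds two equal adjacent characters
theorem stepA_chain {res : List Char} (h : List.IsChain (· ≠ ·) res) (c : Char) :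
    List.IsChain (· ≠ ·) (stepA res c) := by
  unfold stepA
  split
  · rename_i h0
    simp [List.length_eq_zero_iff.mp h0]
  · split
    · exact h.prefix (List.dropLast_prefix res)
    · rename_i hne hlast
      rw [List.isChain_append]
      refine ⟨h, List.isChain_singleton c, ?_⟩
      intro x hx y hy
      simp at hy; subst hy
      intro hxy
      exact hlast (by rw [hx, hxy])

-- processing the same character twice on an adjacent-distinct stack is the identity
theorem stepA_cc {res : List Char} (h : List.IsChain (· ≠ ·) res) (c : Char) :
    stepA (stepA res c) c = res := by
  rcases List.eq_nil_or_concat' res with rfl | ⟨rs, d, rfl⟩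
  · simp [stepA]
  · by_cases hdc : d = c
    · subst hdc
      have h1 : stepA (rs ++ [d]) d = rs := by
        simp [stepA, List.getLast?_concat]
      rw [h1]
      rcases List.eq_nil_or_concat' rs with rfl | ⟨rs', e, rfl⟩
      · simp [stepA]
      · have hec : e ≠ d := by
          rw [List.isChain_append] at h
          exact h.2.2 e (by simp [List.getLast?_concat]) d (by simp)
        simp [stepA, List.getLast?_concat, hec]
    · have h1 : stepA (rs ++ [d]) c = (rs ++ [d]) ++ [c] := by
        simp [stepA, List.getLast?_concat, hdc]
      rw [h1]
      simp [stepA, List.getLast?_concat]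

-- one _pass scan does not change A's stack (over an adjacent-distinct accumulator)
theorem foldl_passB (t : List Char) :
    ∀ res, List.IsChain (· ≠ ·) res →
      (passB t).foldl stepA res = t.foldl stepA res := by
  fun_induction passB t with
  | case1 b t ih =>
    intro res hres
    rw [ih res hres]
    simp [List.foldl, stepA_cc hres]
  | case2 a b t hab ih =>
    intro res hres
    simp only [List.foldl]
    exact ih (stepA res a) (stepA_chain hres a)
  | _ => intro res hres; rfl

-- a fixpoint of _pass has no adjacent equal pair
theorem passB_fix_chain (t : List Char) (h : passB t = t) :
    List.IsChain (· ≠ ·) t := by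
  fun_induction passB t with
  | case1 b t ih =>
    exfalso
    have := passB_len_le t
    have hl : (passB t).length = t.length + 2 := by rw [h]; simp
    omega
  | case2 a b t hab ih =>
    simp only [List.cons.injEq] at h
    exact List.isChain_cons_cons.mpr ⟨hab, ih h.2⟩
  | case3 a => simp
  | case4 => simp

-- A's stack acts as the identity on an adjacent-distinct string
theorem foldl_chain_id (t : List Char) :
    ∀ res, List.IsChain (· ≠ ·) (res ++ t) → t.foldl stepA res = res ++ t := by
  induction t with
  | nil => intro res _; simp
  | cons c t ih =>
    intro res h
    have hstep : stepA res c = res ++ [c] := by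
      rcases List.eq_nil_or_concat' res with rfl | ⟨rs, d, rfl⟩
      · simp [stepA]
      · have hdc : d ≠ c := by
          rw [List.append_assoc, List.isChain_append] at h
          have h2 := h.2.1
          simp only [List.singleton_append] at h2
          exact (List.isChain_cons_cons.mp h2).1
        simp [stepA, List.getLast?_concat, hdc]
    have h' : List.IsChain (· ≠ ·) ((res ++ [c]) ++ t) := by
      simpa using h
    simp only [List.foldl, hstep]
    rw [ih (res ++ [c]) h']
    simp

-- B's fixpoint equals A's stack
theorem fixB_eq_stack (t : List Char) : fixB t = t.foldl stepA [] := by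
  fun_induction fixB t with
  | case1 t u h =>
    rw [foldl_chain_id t [] (by simpa using passB_fix_chain t h)]
    simp
  | case2 t u h ih =>
    rw [ih, foldl_passB t [] (by simp)]

-- ===== VERDICT (by name: the statement is the Claim_ definition above) =====
theorem solution_spec : Claim_equal_solution := by
  intro s _
  unfold Spec_solution solution solution_alt
  rw [fixB_eq_stack]
  rcases h : s.toList.foldl stepA [] with _ | _ <;> simp [h]
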